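-- pv_equiv track=rewrite | github.com/StarDJJ/RGB-FIR-dataset | nets/siamese.py | get_img_output_length
-- ===== SOURCE A (Python) =====
-- def get_img_output_length(width, height):
--     def get_output_length(input_length):
--         # input_length += 6
--         filter_sizes = [7, 3, 1, 1, 1]
--         padding = [3, 1, 0, 0, 0]
--         stride = 2
--         for i in range(5):
--             input_length = (input_length + 2 * padding[i] - filter_sizes[i]) // stride + 1
--         return input_length
--     return get_output_length(width) * get_output_length(height)
-- ===== SOURCE B (Python) =====
-- def get_img_output_length(width, height):
--     # Each of A's five conv steps is L -> ceil(L/2); five of them compose to ceil(L/32) = (L+31)//32.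
--     return ((width + 31) // 32) * ((height + 31) // 32)
-- ===== Notes on version B (the rewrite author's own statement) =====
-- stated objective: simpler
-- what changed: Replaced the 5-iteration loop over filter/padding lists by the closed form ((w+31)//32)*((h+31)//32), since each step equals ceil(L/2).
import Mathlib
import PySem

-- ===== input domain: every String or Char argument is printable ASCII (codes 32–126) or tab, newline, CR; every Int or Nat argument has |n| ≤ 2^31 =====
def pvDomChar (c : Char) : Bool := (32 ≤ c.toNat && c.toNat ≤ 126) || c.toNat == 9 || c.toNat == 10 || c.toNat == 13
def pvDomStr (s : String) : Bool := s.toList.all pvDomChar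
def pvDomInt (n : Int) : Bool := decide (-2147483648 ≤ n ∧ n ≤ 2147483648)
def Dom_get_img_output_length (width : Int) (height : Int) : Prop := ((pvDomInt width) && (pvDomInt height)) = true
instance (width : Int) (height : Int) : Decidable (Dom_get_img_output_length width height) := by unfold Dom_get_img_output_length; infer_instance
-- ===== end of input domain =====

-- B replaces A's five-step loop by the closed form ((w+31)//32)*((h+31)//32); objective: simpler.


-- ===== PORT A =====
-- inner helper get_output_length: loop i in range(5), L = (L + 2*padding[i] - filter_sizes[i]) // 2 + 1
def pvA_get_output_length (input_length : Int) : Int :=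
  let filter_sizes : List Int := [7, 3, 1, 1, 1]
  let padding : List Int := [3, 1, 0, 0, 0]
  let stride : Int := 2
  (PySem.List.pyRange 0 5 1).foldl
    (fun L i =>
      PySem.Int.floordiv (L + 2 * PySem.List.pyGetD padding i 0 - PySem.List.pyGetD filter_sizes i 0) stride + 1)
    input_length

def get_img_output_length (width : Int) (height : Int) : Int :=
  pvA_get_output_length width * pvA_get_output_length height

-- ===== PORT B =====
def get_img_output_length_alt (width : Int) (height : Int) : Int :=
  PySem.Int.floordiv (width + 31) 32 * PySem.Int.floordiv (height + 31) 32

-- ===== PRECONDITION & SPEC =====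
def Spec_get_img_output_length (width : Int) (height : Int) (out : Int) : Prop := out = get_img_output_length_alt width height
instance (width : Int) (height : Int) (out : Int) : Decidable (Spec_get_img_output_length width height out) := by unfold Spec_get_img_output_length; infer_instance

-- ===== CLAIM (what is proved, stated in full; the proofs are below) =====
def Claim_equal_get_img_output_length : Prop := ∀ (width : Int) (height : Int), Dom_get_img_output_length width height → Spec_get_img_output_length width height (get_img_output_length width height)

-- ===== LEMMAS AND PROOFS =====

-- A's five-step halving loop computes ceil(L/32) = (L+31)//32
theorem pvA_closed_form (L : Int) :
    pvA_get_output_length L = PySem.Int.floordiv (L + 31) 32 := by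
  show pvA_get_output_length L = PySem.Int.floordiv (L + 31) 32
  unfold pvA_get_output_length
  simp only [show PySem.List.pyRange 0 5 1 = [0, 1, 2, 3, 4] from by decide,
    List.foldl, PySem.List.pyGetD]
  norm_num [PySem.Int.floordiv_eq_ediv_of_pos (show (0:Int) < 2 by omega),
    PySem.Int.floordiv_eq_ediv_of_pos (show (0:Int) < 32 by omega),
    PySem.List.pyGet?, PySem.List.pyIdx?, show Int.toNat 2 = 2 from rfl, show Int.toNat 3 = 3 from rfl, show Int.toNat 4 = 4 from rfl, List.getElem_cons_succ, List.getElem_cons_zero]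
  omega

-- ===== VERDICT (by name: the statement is the Claim_ definition above) =====
theorem get_img_output_length_spec : Claim_equal_get_img_output_length := by
  intro width height _
  unfold Spec_get_img_output_length get_img_output_length get_img_output_length_alt
  rw [pvA_closed_form, pvA_closed_form]
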